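-- pv_equiv track=rewrite | github.com/waverill2/CPSC322-Final-Project | mysklearn/utils.py | compute_bin_frequencies
-- ===== SOURCE A (Python) =====
-- def compute_bin_frequencies(values: list, cutoffs: list):
--     """Compute the frequencies for each value in their respective bin as a part of
--     "equal width" binning discretization. Iterates through values and increases the
--     frequency of the corresponding cutoff from the given cutoffs table as necessary.
--
--     Args:
--         values (list): values used to count frequencies
--         cutoffs (list of float): cutoff values of bins
--
--     Returns:
--         list of int: number of occurences that are in each "bin"
--     """
--     frequencies = [0 for _ in range(len(cutoffs)-1)] # because N + 1 cutoffs
--     for value in values: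
--         if value == max(values): # fully closed last bin
--             frequencies[-1] += 1
--         else:
--             for index in range(len(cutoffs)-1): # remaining half-open bins
--                 if cutoffs[index] <= value and value < cutoffs[index + 1]:
--                     frequencies[index] += 1
--     return frequencies
-- ===== SOURCE B (Python) =====
-- def compute_bin_frequencies(values: list, cutoffs: list):
--     n = len(cutoffs) - 1
--     if not values:
--         return [0] * n
--     m = max(values)
--     rest = [v for v in values if v != m]
--     frequencies = [sum(1 for v in rest if cutoffs[i] <= v < cutoffs[i + 1])
--                    for i in range(n)]
--     frequencies[-1] += len(values) - len(rest)
--     return frequencies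
-- ===== Notes on version B (the rewrite author's own statement) =====
-- stated objective: alternative
-- what changed: B computes max(values) once (A recomputes it for every element), counts the max multiplicity arithmetically into the last bin, and counts per bin over the filtered non-max values instead of scanning the bins inside the per-value loop.
import Mathlib
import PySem

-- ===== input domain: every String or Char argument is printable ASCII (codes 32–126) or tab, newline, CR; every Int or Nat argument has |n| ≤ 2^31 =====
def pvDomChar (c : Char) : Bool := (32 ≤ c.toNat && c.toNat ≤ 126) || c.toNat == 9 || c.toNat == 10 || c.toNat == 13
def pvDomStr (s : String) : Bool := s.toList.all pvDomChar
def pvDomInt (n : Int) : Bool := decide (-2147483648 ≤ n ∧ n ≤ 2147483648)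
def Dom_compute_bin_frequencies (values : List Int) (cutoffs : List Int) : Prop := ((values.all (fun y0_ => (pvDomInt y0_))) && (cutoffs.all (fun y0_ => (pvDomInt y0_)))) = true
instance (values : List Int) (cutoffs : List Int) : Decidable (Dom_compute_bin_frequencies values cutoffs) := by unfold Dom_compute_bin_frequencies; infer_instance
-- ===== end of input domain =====

-- B hoists max(values) out of the loop (A recomputes it per element), flips the traversal
-- (per-bin counting over the filtered non-max values) and adds the max multiplicity to the
-- last bin arithmetically.


-- ===== PORT A =====
-- body of A's `for value in values` loop; `frequencies[-1] += 1` is modify at length-1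
-- (Python raises IndexError on the empty list there; that input is outside Pre_ and the
-- modify is a no-op).  cutoffs.getD is exact: index and index+1 are < cutoffs.length.
def pyStepA (values : List Int) (cutoffs : List Int)
    (frequencies : List Int) (value : Int) : List Int :=
  if PySem.List.max? values (fun x => x) = some value then
    frequencies.modify (frequencies.length - 1) (· + 1)
  else
    (List.range (cutoffs.length - 1)).foldl (fun f index =>
      if cutoffs.getD index 0 ≤ value ∧ value < cutoffs.getD (index + 1) 0 then
        f.modify index (· + 1)
      else f) frequencies

def compute_bin_frequencies (values : List Int) (cutoffs : List Int) : List Int :=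
  values.foldl (pyStepA values cutoffs) (List.replicate (cutoffs.length - 1) 0)

-- ===== PORT B =====
-- Source B's local variables m, rest, frequencies become the helpers altMax, altRest, altFreqs.
def altMax (values : List Int) : Int :=
  (PySem.List.max? values (fun x => x)).getD 0  -- some, since used only when values ≠ []

def altRest (values : List Int) : List Int :=
  values.filter (fun v => v ≠ altMax values)

def altFreqs (values : List Int) (cutoffs : List Int) : List Int :=
  (List.range (cutoffs.length - 1)).map (fun i =>
    (((altRest values).filter
        (fun v => decide (cutoffs.getD i 0 ≤ v ∧ v < cutoffs.getD (i + 1) 0))).length : Int))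

-- `frequencies[-1] += …` as modify at length-1 (raises in Python only outside Pre_).
def compute_bin_frequencies_alt (values : List Int) (cutoffs : List Int) : List Int :=
  if values = [] then List.replicate (cutoffs.length - 1) 0
  else
    (altFreqs values cutoffs).modify ((altFreqs values cutoffs).length - 1)
      (· + ((values.length : Int) - ((altRest values).length : Int)))

-- ===== PRECONDITION & SPEC =====
-- Pre_ excludes exactly the inputs where Python A raises IndexError (values nonempty but
-- fewer than two cutoffs: `frequencies[-1]` on the empty list); Python B raises there too.
def Pre_compute_bin_frequencies (values : List Int) (cutoffs : List Int) : Prop :=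
  values = [] ∨ 2 ≤ cutoffs.length
instance (values : List Int) (cutoffs : List Int) : Decidable (Pre_compute_bin_frequencies values cutoffs) := by unfold Pre_compute_bin_frequencies; infer_instance

def pvWitness_compute_bin_frequencies : List Int × List Int := ([1, 2, 3], [0, 2, 4])

def Spec_compute_bin_frequencies (values : List Int) (cutoffs : List Int) (out : List Int) : Prop := out = compute_bin_frequencies_alt values cutoffs
instance (values : List Int) (cutoffs : List Int) (out : List Int) : Decidable (Spec_compute_bin_frequencies values cutoffs out) := by unfold Spec_compute_bin_frequencies; infer_instance

-- ===== CLAIM (what is proved, stated in full; the proofs are below) =====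
def Claim_equal_compute_bin_frequencies : Prop := ∀ (values : List Int) (cutoffs : List Int), Dom_compute_bin_frequencies values cutoffs → Pre_compute_bin_frequencies values cutoffs → Spec_compute_bin_frequencies values cutoffs (compute_bin_frequencies values cutoffs)

-- ===== LEMMAS AND PROOFS =====

-- the per-element contribution of A's loop body to bin i, given max m and L = len(cutoffs)-1
def deltaA (cutoffs : List Int) (L : Nat) (m : Int) (i : Nat) (v : Int) : Int :=
  if v = m then (if i = L - 1 then 1 else 0)
  else if cutoffs.getD i 0 ≤ v ∧ v < cutoffs.getD (i + 1) 0 then 1 else 0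

lemma inner_length (cutoffs : List Int) (value : Int) :
    ∀ (r : List Nat) (f : List Int),
      (r.foldl (fun f index =>
        if cutoffs.getD index 0 ≤ value ∧ value < cutoffs.getD (index + 1) 0 then
          f.modify index (· + 1) else f) f).length = f.length := by
  intro r
  induction r with
  | nil => intro f; rfl
  | cons a t ih =>
    intro f
    simp only [List.foldl_cons]
    rw [ih]
    split <;> simp [List.length_modify]

lemma getD_modify_of_lt {l : List Int} {j i : Nat} (g : Int → Int) (h : i < l.length) :
    (l.modify j g).getD i 0 = if j = i then g (l.getD i 0) else l.getD i 0 := by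
  simp only [List.getD_eq_getElem?_getD, List.getElem?_modify]
  rw [List.getElem?_eq_getElem h]
  split <;> simp

lemma inner_getD (cutoffs : List Int) (value : Int) :
    ∀ (n : Nat) (f : List Int) (i : Nat), i < f.length →
      ((List.range n).foldl (fun f index =>
        if cutoffs.getD index 0 ≤ value ∧ value < cutoffs.getD (index + 1) 0 then
          f.modify index (· + 1) else f) f).getD i 0
      = f.getD i 0 + (if i < n ∧ (cutoffs.getD i 0 ≤ value ∧ value < cutoffs.getD (i + 1) 0)
          then 1 else 0) := by
  intro n
  induction n with
  | zero => intro f i hi; simp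
  | succ n ih =>
    intro f i hi
    rw [List.range_succ, List.foldl_append, List.foldl_cons, List.foldl_nil]
    by_cases hb : cutoffs.getD n 0 ≤ value ∧ value < cutoffs.getD (n + 1) 0
    · rw [if_pos hb]
      rw [getD_modify_of_lt (· + 1) (by rw [inner_length]; exact hi)]
      rw [ih f i hi]
      by_cases hni : n = i
      · subst hni
        have e1 : (if n < n ∧ (cutoffs.getD n 0 ≤ value ∧ value < cutoffs.getD (n + 1) 0) then (1:Int) else 0) = 0 := by
          rw [if_neg]; exact fun h => absurd h.1 (by omega)
        have e2 : (if n < n + 1 ∧ (cutoffs.getD n 0 ≤ value ∧ value < cutoffs.getD (n + 1) 0) then (1:Int) else 0) = 1 := by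
          rw [if_pos ⟨by omega, hb⟩]
        rw [if_pos rfl, e1, e2]; ring
      · rw [if_neg hni]
        by_cases hlt : i < n
        · simp [hlt, Nat.lt_succ_of_lt hlt]
        · have e1 : ¬ (i < n ∧ (cutoffs.getD i 0 ≤ value ∧ value < cutoffs.getD (i + 1) 0)) :=
            fun h => hlt h.1
          have e2 : ¬ (i < n + 1 ∧ (cutoffs.getD i 0 ≤ value ∧ value < cutoffs.getD (i + 1) 0)) :=
            fun h => absurd h.1 (by omega)
          rw [if_neg e1, if_neg e2]
    · rw [if_neg hb, ih f i hi]
      by_cases hni : n = i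
      · subst hni
        have e1 : (if n < n ∧ (cutoffs.getD n 0 ≤ value ∧ value < cutoffs.getD (n + 1) 0) then (1:Int) else 0) = 0 := by
          rw [if_neg]; exact fun h => absurd h.1 (by omega)
        have e2 : (if n < n + 1 ∧ (cutoffs.getD n 0 ≤ value ∧ value < cutoffs.getD (n + 1) 0) then (1:Int) else 0) = 0 := by
          rw [if_neg]; exact fun h => hb h.2
        rw [e1, e2]
      · by_cases hlt : i < n
        · simp [hlt, Nat.lt_succ_of_lt hlt]
        · have h2 : ¬ (i < n + 1) := by omega
          simp [hlt, h2]

lemma stepA_length (values cutoffs : List Int) (f : List Int) (v : Int) :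
    (pyStepA values cutoffs f v).length = f.length := by
  unfold pyStepA
  split
  · simp [List.length_modify]
  · exact inner_length cutoffs v _ f

lemma stepA_getD (values cutoffs : List Int) {m : Int}
    (hm : PySem.List.max? values (fun x => x) = some m)
    (f : List Int) (v : Int) (i : Nat)
    (hL : f.length = cutoffs.length - 1) (hi : i < cutoffs.length - 1) :
    (pyStepA values cutoffs f v).getD i 0
      = f.getD i 0 + deltaA cutoffs (cutoffs.length - 1) m i v := by
  unfold pyStepA deltaA
  rw [hm]
  by_cases hv : v = m
  · rw [hv, if_pos rfl, if_pos rfl, getD_modify_of_lt (· + 1) (by omega), hL]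
    by_cases h : cutoffs.length - 1 - 1 = i
    · rw [if_pos h, if_pos h.symm]
    · rw [if_neg h, if_neg (fun h' => h h'.symm)]
      simp
  · rw [if_neg (fun h => hv (Option.some.inj h).symm), if_neg hv]
    rw [inner_getD cutoffs v _ f i (by omega)]
    simp [hi]

lemma foldA_getD (values cutoffs : List Int) {m : Int}
    (hm : PySem.List.max? values (fun x => x) = some m) :
    ∀ (l : List Int) (f : List Int) (i : Nat),
      f.length = cutoffs.length - 1 → i < cutoffs.length - 1 →
      (l.foldl (pyStepA values cutoffs) f).getD i 0
        = f.getD i 0 + (l.map (deltaA cutoffs (cutoffs.length - 1) m i)).sum := by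
  intro l
  induction l with
  | nil => intro f i _ _; simp
  | cons v t ih =>
    intro f i hL hi
    rw [List.foldl_cons, ih _ i (by rw [stepA_length]; exact hL) hi,
        stepA_getD values cutoffs hm f v i hL hi]
    simp
    ring

lemma foldA_length (values cutoffs : List Int) :
    ∀ (l : List Int) (f : List Int),
      (l.foldl (pyStepA values cutoffs) f).length = f.length := by
  intro l
  induction l with
  | nil => intro f; rfl
  | cons v t ih => intro f; rw [List.foldl_cons, ih, stepA_length]

-- the delta sum splits into the non-max bin count and the max count at the last bin
lemma sum_delta (cutoffs : List Int) (L : Nat) (m : Int) (i : Nat) :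
    ∀ (l : List Int),
      (l.map (deltaA cutoffs L m i)).sum
        = ((l.countP (fun v => decide (v ≠ m) &&
              decide (cutoffs.getD i 0 ≤ v ∧ v < cutoffs.getD (i + 1) 0)) : Int))
          + (if i = L - 1 then ((l.countP (fun v => decide (v = m))) : Int) else 0) := by
  intro l
  induction l with
  | nil => simp
  | cons v t ih =>
    simp only [List.map_cons, List.sum_cons, List.countP_cons, ih]
    unfold deltaA
    by_cases hv : v = m
    · by_cases hiL : i = L - 1 <;> simp [hv, hiL] <;> ring
    · by_cases hb : cutoffs.getD i 0 ≤ v ∧ v < cutoffs.getD (i + 1) 0 <;>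
        by_cases hiL : i = L - 1 <;> simp [hv, hb, hiL] <;> ring

lemma altFreqs_length (values cutoffs : List Int) :
    (altFreqs values cutoffs).length = cutoffs.length - 1 := by
  simp [altFreqs]

lemma altFreqs_getD (values cutoffs : List Int) (j : Nat) (hj : j < cutoffs.length - 1) :
    (altFreqs values cutoffs).getD j 0
      = (((altRest values).filter
          (fun v => decide (cutoffs.getD j 0 ≤ v ∧ v < cutoffs.getD (j + 1) 0))).length : Int) := by
  unfold altFreqs
  rw [List.getD_eq_getElem?_getD, List.getElem?_map, List.getElem?_range hj]
  rfl

-- ===== VERDICT (by name: the statement is the Claim_ definition above) =====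
theorem compute_bin_frequencies_spec : Claim_equal_compute_bin_frequencies := by
  intro values cutoffs _ hpre
  unfold Spec_compute_bin_frequencies compute_bin_frequencies compute_bin_frequencies_alt
  by_cases hv : values = []
  · subst hv; simp
  · rw [if_neg hv]
    obtain ⟨m, hm⟩ : ∃ m, PySem.List.max? values (fun x => x) = some m := by
      cases h : PySem.List.max? values (fun x => x) with
      | none => exact absurd ((PySem.List.max?_eq_none_iff values (fun x => x)).mp h) hv
      | some m => exact ⟨m, rfl⟩
    have hmax : altMax values = m := by unfold altMax; rw [hm]; rfl
    have hrest : (altRest values).length = values.countP (fun v => decide (v ≠ m)) := by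
      unfold altRest
      rw [hmax]
      exact List.countP_eq_length_filter.symm
    have hsplit : values.countP (fun v => decide (v ≠ m))
        + values.countP (fun v => decide (v = m)) = values.length := by
      rw [List.length_eq_countP_add_countP (fun v => decide (v ≠ m)) (l := values)]
      congr 1
      congr 1
      funext a
      by_cases hx : a = m <;> simp [hx]
    have hcnt : ∀ j : Nat, j < cutoffs.length - 1 →
        (((altRest values).filter
            (fun v => decide (cutoffs.getD j 0 ≤ v ∧ v < cutoffs.getD (j + 1) 0))).length : Int)
        = ((values.countP (fun v => decide (v ≠ m) &&
            decide (cutoffs.getD j 0 ≤ v ∧ v < cutoffs.getD (j + 1) 0))) : Int) := by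
      intro j hj
      unfold altRest
      rw [hmax, List.filter_filter]
      have hpq : (fun a => decide (cutoffs.getD j 0 ≤ a ∧ a < cutoffs.getD (j + 1) 0)
            && decide (a ≠ m))
          = (fun v : Int => decide (v ≠ m)
            && decide (cutoffs.getD j 0 ≤ v ∧ v < cutoffs.getD (j + 1) 0)) := by
        funext a; exact Bool.and_comm _ _
      rw [hpq, List.countP_eq_length_filter]
    have hAlen : (values.foldl (pyStepA values cutoffs)
        (List.replicate (cutoffs.length - 1) 0)).length = cutoffs.length - 1 := by
      rw [foldA_length]; simp
    apply List.ext_getElem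
    · rw [hAlen, List.length_modify, altFreqs_length]
    · intro i h1 h2
      have hiL : i < cutoffs.length - 1 := by rwa [hAlen] at h1
      have hgetD : ∀ (l : List Int) (h : i < l.length), l[i] = l.getD i 0 := by
        intro l h
        rw [List.getD_eq_getElem?_getD, List.getElem?_eq_getElem h]
        rfl
      rw [hgetD _ h1, hgetD _ h2]
      rw [foldA_getD values cutoffs hm values (List.replicate (cutoffs.length - 1) 0) i
        (by simp) hiL, sum_delta]
      have hrep : (List.replicate (cutoffs.length - 1) (0 : Int)).getD i 0 = 0 := by
        rw [List.getD_eq_getElem?_getD, List.getElem?_replicate]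
        split <;> rfl
      rw [hrep]
      rw [getD_modify_of_lt _ (by rw [altFreqs_length]; exact hiL)]
      rw [altFreqs_length]
      by_cases hil : cutoffs.length - 1 - 1 = i
      · rw [if_pos hil, altFreqs_getD values cutoffs i hiL, hcnt i hiL,
          if_pos hil.symm, hrest]
        have := hsplit
        omega
      · rw [if_neg hil, altFreqs_getD values cutoffs i hiL, hcnt i hiL,
          if_neg (fun h => hil h.symm)]
        simp
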